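-- pv_equiv track=rewrite | github.com/remusao/katas | aoc2018/day8/part2.py | solve
-- ===== SOURCE A (Python) =====
-- def solve(inputs, index=0):
--     number_of_children = inputs[index]
--     number_of_metadata = inputs[index + 1]
--     index += 2
--
--     # Get children of node
--     children = {}
--     for child_index in range(1, number_of_children + 1):
--         (sub_result, index) = solve(inputs=inputs, index=index)
--         children[child_index] = sub_result
--
--     # Get metadata
--     metadata = [inputs[index + i] for i in range(number_of_metadata)]
--
--     # Compute value for this level
--     return (
--         sum(metadata)
--         if number_of_children == 0
--         else sum(children.get(child, 0) for child in metadata),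
--         index + number_of_metadata,
--     )
-- ===== SOURCE B (Python) =====
-- def solve(inputs, index=0):
--     # Iterative: explicit stack of [children_count, metadata_count, child_values] frames.
--     stack = []
--     i = index
--     while True:
--         c, m = inputs[i], inputs[i + 1]
--         i += 2
--         stack.append([c, m, []])
--         while stack[-1][0] <= len(stack[-1][2]):
--             c, m, vals = stack.pop()
--             metadata = [inputs[i + k] for k in range(m)]
--             i += m
--             if c == 0:
--                 value = sum(metadata)
--             else:
--                 value = sum(vals[x - 1] if 1 <= x <= len(vals) else 0
--                             for x in metadata)
--             if not stack:
--                 return (value, i)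
--             stack[-1][2].append(value)
-- ===== Notes on version B (the rewrite author's own statement) =====
-- stated objective: alternative
-- what changed: Replaces A's recursion (one recursive call per child, a dict of child values per node) by a single iterative loop over an explicit stack of (children-count, metadata-count, collected-child-values) frames, closing frames and propagating values upward as the cursor advances.
import Mathlib
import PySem

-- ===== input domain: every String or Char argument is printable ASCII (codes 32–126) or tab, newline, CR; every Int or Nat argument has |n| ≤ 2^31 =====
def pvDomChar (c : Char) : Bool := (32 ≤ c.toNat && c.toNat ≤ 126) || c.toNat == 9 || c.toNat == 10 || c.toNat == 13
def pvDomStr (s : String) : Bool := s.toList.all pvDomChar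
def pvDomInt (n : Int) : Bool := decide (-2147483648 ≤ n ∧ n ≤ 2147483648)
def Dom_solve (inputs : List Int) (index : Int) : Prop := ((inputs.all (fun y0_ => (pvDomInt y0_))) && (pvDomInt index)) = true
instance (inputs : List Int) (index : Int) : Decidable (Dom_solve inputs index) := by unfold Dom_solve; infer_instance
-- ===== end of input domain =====

-- B replaces A's recursion by one iterative loop over an explicit stack of frames (objective: alternative).
-- Equivalence of the RETURN values is proved on Pre_solve = exactly the inputs whose suffix parses as one
-- header-tree node (everywhere else the Python A raises: IndexError, or unbounded recursion on a position cycle).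

-- fuel for the two ports' loops: a proved upper bound on the number of nodes of any parse tree
-- (widths are ≤ the largest |element|, root-path positions are distinct valid indices, so depth ≤ 2·len);
-- purely a totality device — on Pre_solve it is proved sufficient (nodesT_le_pvFuel below).
def pvMaxAbs (inputs : List Int) : Nat := inputs.foldr (fun x a => max x.natAbs a) 0
def pvFuel (inputs : List Int) : Nat := (pvMaxAbs inputs + 1) ^ (2 * inputs.length)

-- ===== PORT A =====

-- '[inputs[index + i] for i in range(m)]' — read m consecutive elements via Python indexing
-- (none = IndexError; m < 0 gives []); shared by both ports (the comprehension is the same line in both Pythons).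
def readN (inputs : List Int) : Int → Nat → Option (List Int)
  | _, 0 => some []
  | j, n+1 =>
    match PySem.List.pyGet? inputs j with
    | none => none
    | some x =>
      match readN inputs (j+1) n with
      | none => none
      | some rest => some (x :: rest)

-- A's recursion, with fuel (Python recursion either returns or raises; pvFuel is proved sufficient
-- on Pre_solve). none = exception or fuel exhaustion.
mutual
def aGo : Nat → List Int → Int → Option (Int × Int)
  | 0, _, _ => none
  | fuel+1, inputs, index =>
    match PySem.List.pyGet? inputs index, PySem.List.pyGet? inputs (index+1) with
    | some c, some m =>
      -- for child_index in range(1, number_of_children + 1): children[child_index] = solve(...)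
      match aChildren fuel inputs (PySem.List.pyRange 1 (c+1) 1) PySem.Dict.empty (index+2) with
      | some (children, index2) =>
        match readN inputs index2 m.toNat with
        | some metadata =>
          some (if c = 0 then metadata.sum
                else (metadata.map (fun child => children.getD child 0)).sum,
                index2 + m)
        | none => none
      | none => none
    | _, _ => none
  termination_by fuel _ _ => (fuel, 0)

def aChildren : Nat → List Int → List Int → PySem.Dict Int Int → Int → Option (PySem.Dict Int Int × Int)
  | _, _, [], d, i => some (d, i)
  | fuel, inputs, k :: ks, d, i =>
    match aGo fuel inputs i with
    | some r => aChildren fuel inputs ks (d.insert k r.1) r.2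
    | none => none
  termination_by fuel _ ks _ _ => (fuel, ks.length + 1)
end

def solve (inputs : List Int) (index : Int) : Int × Int :=
  (aGo (pvFuel inputs) inputs index).getD (0, 0)

-- ===== PORT B =====

-- value of a closed frame: sum(metadata) if no children, else 1-based lookups in vals
def nodeValue (c : Int) (metadata : List Int) (vals : List Int) : Int :=
  if c = 0 then metadata.sum
  else (metadata.map (fun x =>
          if 1 ≤ x ∧ x ≤ (vals.length : Int) then (PySem.List.pyGet? vals (x - 1)).getD 0
          else 0)).sum

-- inner 'while stack[-1][0] <= len(stack[-1][2]):' loop — close completed frames,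
-- propagating each value into the parent frame; .inl = function returns, .inr = loop exits.
def bClose (inputs : List Int) : Int → List (Int × Int × List Int) → Option ((Int × Int) ⊕ (Int × List (Int × Int × List Int)))
  | i, [] => some (.inr (i, []))   -- unreachable: the loop always runs with a nonempty stack
  | i, (c, m, vals) :: st =>
    if c ≤ (vals.length : Int) then
      match readN inputs i m.toNat with
      | none => none
      | some metadata =>
        let value := nodeValue c metadata vals
        match st with
        | [] => some (.inl (value, i + m))
        | (c2, m2, vals2) :: st2 => bClose inputs (i + m) ((c2, m2, vals2 ++ [value]) :: st2)
    else some (.inr (i, (c, m, vals) :: st))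
termination_by _ st => st.length

-- outer 'while True:' loop, with fuel (one iteration per node; pvFuel is proved sufficient on Pre_solve)
def bLoop : Nat → List Int → Int → List (Int × Int × List Int) → Option (Int × Int)
  | 0, _, _, _ => none
  | fuel+1, inputs, i, stack =>
    match PySem.List.pyGet? inputs i, PySem.List.pyGet? inputs (i+1) with
    | some c, some m =>
      match bClose inputs (i+2) ((c, m, []) :: stack) with
      | none => none
      | some (.inl r) => some r
      | some (.inr (i', st')) => bLoop fuel inputs i' st'
    | _, _ => none

def solve_alt (inputs : List Int) (index : Int) : Int × Int :=
  (bLoop (pvFuel inputs) inputs index []).getD (0, 0)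

-- ===== PRECONDITION & SPEC =====

-- the header-tree shape A's traversal follows: a node is (#children c, #metadata m,
-- children…, metadata…); Python's semantics make c < 0 act as 'no children' and m < 0 as
-- 'no metadata, cursor moves back by |m|', and indices read Python-style (negative = from the end)
mutual
inductive PTree where
  | node : Int → Int → List Int → PForest → PTree    -- c, m, metadata, children
inductive PForest where
  | nil : PForest
  | cons : PTree → PForest → PForest
end

def lenF : PForest → Nat
  | .nil => 0
  | .cons _ f => lenF f + 1

mutual
def nodesT : PTree → Nat
  | .node _ _ _ f => nodesF f + 1
def nodesF : PForest → Nat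
  | .nil => 0
  | .cons t f => nodesT t + nodesF f
end

mutual
def depthT : PTree → Nat
  | .node _ _ _ f => depthF f + 1
def depthF : PForest → Nat
  | .nil => 0
  | .cons t f => max (depthT t) (depthF f)
end

-- end position of a node / of a run of sibling nodes starting at position i
mutual
def endT (i : Int) : PTree → Int
  | .node _ m _ f => endF (i+2) f + m
def endF (i : Int) : PForest → Int
  | .nil => i
  | .cons t f => endF (endT i t) f
end

-- 'the node t is exactly what A's traversal reads starting at position i'
mutual
def okT (inputs : List Int) : Int → PTree → Prop
  | i, .node c m md f =>
    PySem.List.pyGet? inputs i = some c ∧ PySem.List.pyGet? inputs (i+1) = some m ∧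
    (lenF f : Int) = max c 0 ∧ okF inputs (i+2) f ∧
    readN inputs (endF (i+2) f) m.toNat = some md
def okF (inputs : List Int) : Int → PForest → Prop
  | _, .nil => True
  | i, .cons t f => okT inputs i t ∧ okF inputs (endT i t) f
end

-- recognizer (used only to DECIDE Pre_solve; correctness proved just below):
-- chkG fuel n b i parses n consecutive nodes at position i within a budget of b nodes,
-- returning the end position and the remaining budget; structural in fuel so `decide` evaluates it.
def chkG (inputs : List Int) : Nat → Nat → Nat → Int → Option (Int × Nat)
  | 0, _, _, _ => none
  | _+1, 0, b, i => some (i, b)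
  | fuel+1, n+1, b, i =>
    match b with
    | 0 => none
    | b+1 =>
      match PySem.List.pyGet? inputs i, PySem.List.pyGet? inputs (i+1) with
      | some c, some m =>
        match chkG inputs fuel c.toNat b (i+2) with
        | some (j, b2) =>
          match readN inputs j m.toNat with
          | some _ => chkG inputs fuel n b2 (j+m)
          | none => none
        | none => none
      | _, _ => none

theorem chkG_sound (inputs : List Int) : ∀ (fuel n b : Nat) (i j : Int) (b' : Nat),
    chkG inputs fuel n b i = some (j, b') →
    ∃ f : PForest, lenF f = n ∧ okF inputs i f ∧ endF i f = j ∧ b = b' + nodesF f := by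
  intro fuel
  induction fuel with
  | zero => intro n b i j b' h; simp [chkG] at h
  | succ fuel ih =>
    intro n b i j b' h
    cases n with
    | zero =>
      simp only [chkG, Option.some_inj, Prod.mk.injEq] at h
      exact ⟨.nil, rfl, trivial, by simp [endF, h.1], by simp [nodesF, h.2]⟩
    | succ n =>
      cases b with
      | zero => simp [chkG] at h
      | succ b =>
        rw [chkG] at h
        cases hg1 : PySem.List.pyGet? inputs i with
        | none => rw [hg1] at h; simp at h
        | some c =>
          cases hg2 : PySem.List.pyGet? inputs (i+1) with
          | none => rw [hg1, hg2] at h; simp at h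
          | some m =>
            rw [hg1, hg2] at h
            dsimp only at h
            cases h1 : chkG inputs fuel c.toNat b (i+2) with
            | none => rw [h1] at h; simp at h
            | some jb =>
              obtain ⟨j1, b2⟩ := jb
              rw [h1] at h
              dsimp only at h
              cases h2 : readN inputs j1 m.toNat with
              | none => rw [h2] at h; simp at h
              | some md =>
                rw [h2] at h
                obtain ⟨g, hg_len, hg_ok, hg_end, hg_b⟩ := ih c.toNat b (i+2) j1 b2 h1
                obtain ⟨f', hf_len, hf_ok, hf_end, hf_b⟩ := ih n b2 (j1+m) j b' h
                refine ⟨.cons (.node c m md g) f', by simp [lenF, hf_len], ?_, ?_, ?_⟩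
                · refine ⟨⟨hg1, hg2, ?_, hg_ok, by rw [hg_end]; exact h2⟩, ?_⟩
                  · rw [hg_len]; exact Int.toNat_eq_max c
                  · simpa [endT, hg_end] using hf_ok
                · simp [endF, endT, hg_end, hf_end]
                · simp only [nodesF, nodesT]; omega

theorem chkG_complete (inputs : List Int) : ∀ (fuel : Nat) (f : PForest) (b : Nat) (i : Int),
    okF inputs i f → nodesF f + 1 ≤ fuel → nodesF f ≤ b →
    chkG inputs fuel (lenF f) b i = some (endF i f, b - nodesF f) := by
  intro fuel
  induction fuel with
  | zero => intro f b i _ h _; omega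
  | succ fuel ih =>
    intro f b i hok hfuel hb
    cases f with
    | nil => simp [chkG, lenF, endF, nodesF]
    | cons t f' =>
      cases t with
      | node c m md g =>
        obtain ⟨⟨hg1, hg2, hcnt, hokg, hread⟩, hokf'⟩ := hok
        simp only [nodesF, nodesT] at hfuel hb ⊢
        have hcg : c.toNat = lenF g := by omega
        rw [lenF]
        cases b with
        | zero => omega
        | succ b =>
          rw [chkG, hg1, hg2]
          dsimp only
          rw [hcg, ih g b (i+2) hokg (by omega) (by omega)]
          dsimp only
          rw [hread]
          dsimp only
          rw [ih f' (b - nodesF g) (endF (i+2) g + m) (by simpa [endT] using hokf') (by omega) (by omega)]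
          have e : endF (endF (i+2) g + m) f' = endF i (PForest.cons (PTree.node c m md g) f') := by
            simp [endF, endT]
          rw [e, show (b - nodesF g) - nodesF f' = b + 1 - (nodesF g + 1 + nodesF f') by omega]

-- ===== fuel sufficiency: any parse tree has at most pvFuel nodes =====

theorem natAbs_le_pvMaxAbs (inputs : List Int) : ∀ x ∈ inputs, x.natAbs ≤ pvMaxAbs inputs := by
  induction inputs with
  | nil => intro x hx; cases hx
  | cons y ys ih =>
    intro x hx
    rcases List.mem_cons.mp hx with h | h
    · subst h; exact le_max_left _ _
    · exact le_trans (ih x h) (le_max_right _ _)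

theorem one_le_nodesT (t : PTree) : 1 ≤ nodesT t := by
  cases t with
  | node c m md f => simp [nodesT]

-- the parse at a given position is unique
mutual
theorem okT_unique (inputs : List Int) : ∀ (t t' : PTree) (i : Int),
    okT inputs i t → okT inputs i t' → t = t'
  | .node c m md f, .node c' m' md' f', i, h, h' => by
    obtain ⟨h1, h2, h3, h4, h5⟩ := h
    obtain ⟨h1', h2', h3', h4', h5'⟩ := h'
    have ec : c = c' := by rw [h1] at h1'; exact Option.some_inj.mp h1'
    have em : m = m' := by rw [h2] at h2'; exact Option.some_inj.mp h2'
    subst ec; subst em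
    have ef : f = f' := okF_unique inputs f f' (i+2) (by omega) h4 h4'
    subst ef
    have emd : md = md' := by rw [h5] at h5'; exact Option.some_inj.mp h5'
    subst emd; rfl
theorem okF_unique (inputs : List Int) : ∀ (f f' : PForest) (i : Int),
    lenF f = lenF f' → okF inputs i f → okF inputs i f' → f = f'
  | .nil, .nil, _, _, _, _ => rfl
  | .nil, .cons _ _, _, hlen, _, _ => by simp [lenF] at hlen
  | .cons _ _, .nil, _, hlen, _, _ => by simp [lenF] at hlen
  | .cons t f, .cons t' f', i, hlen, h, h' => by
    obtain ⟨ht, hf⟩ := h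
    obtain ⟨ht', hf'⟩ := h'
    have et : t = t' := okT_unique inputs t t' i ht ht'
    subst et
    have ef : f = f' := okF_unique inputs f f' (endT i t) (by simpa [lenF] using hlen) hf hf'
    subst ef; rfl
end

-- a parsed node starts at a valid Python index
theorem okT_inRange (inputs : List Int) (t : PTree) (i : Int) (h : okT inputs i t) :
    -(inputs.length : Int) ≤ i ∧ i < (inputs.length : Int) := by
  cases t with
  | node c m md f =>
    obtain ⟨h1, _, _, _, _⟩ := h
    by_contra hc
    rw [(PySem.List.pyGet?_eq_none_iff inputs i).mpr (fun hr => hc hr)] at h1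
    cases h1

-- a Nodup list of valid positions has at most 2·len elements
theorem nodup_valid_length (n : Nat) (l : List Int) (hnd : l.Nodup)
    (hv : ∀ x ∈ l, -(n : Int) ≤ x ∧ x < (n : Int)) : l.length ≤ 2 * n := by
  have hsub : l.toFinset ⊆ Finset.Ico (-(n : Int)) (n : Int) := by
    intro x hx
    rw [Finset.mem_Ico]
    exact hv x (List.mem_toFinset.mp hx)
  have hcard := Finset.card_le_card hsub
  rw [List.toFinset_card_of_nodup hnd, Int.card_Ico] at hcard
  omega

-- depth bound: along a root path all start positions are distinct (a repeat would make the
-- unique parse at that position a strict subtree of itself), and all are valid indices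
mutual
theorem depth_bound_T (inputs : List Int) : ∀ (t : PTree) (i : Int) (anc : List (PTree × Int)),
    okT inputs i t →
    (∀ p ∈ anc, okT inputs p.2 p.1 ∧ nodesT t < nodesT p.1) →
    (anc.map Prod.snd).Nodup → i ∉ anc.map Prod.snd →
    depthT t + anc.length ≤ 2 * inputs.length
  | .node c m md f, i, anc, hok, hanc, hnd, hni => by
    obtain ⟨h1, h2, h3, h4, h5⟩ := hok
    have hrec := depth_bound_F inputs f (i+2) ((PTree.node c m md f, i) :: anc) h4
      (by
        intro p hp
        rcases List.mem_cons.mp hp with h | h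
        · subst h
          exact ⟨⟨h1, h2, h3, h4, h5⟩, by simp [nodesT]⟩
        · obtain ⟨hpok, hplt⟩ := hanc p h
          exact ⟨hpok, lt_trans (by simp [nodesT]) hplt⟩)
      (by rw [List.map_cons]; exact List.nodup_cons.mpr ⟨hni, hnd⟩)
    simp only [List.length_cons] at hrec
    simp only [depthT]
    omega
theorem depth_bound_F (inputs : List Int) : ∀ (f : PForest) (i : Int) (anc : List (PTree × Int)),
    okF inputs i f →
    (∀ p ∈ anc, okT inputs p.2 p.1 ∧ nodesF f < nodesT p.1) →
    (anc.map Prod.snd).Nodup →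
    depthF f + anc.length ≤ 2 * inputs.length
  | .nil, i, anc, _, hanc, hnd => by
    have : (anc.map Prod.snd).length ≤ 2 * inputs.length := by
      apply nodup_valid_length _ _ hnd
      intro x hx
      obtain ⟨p, hp, hpx⟩ := List.mem_map.mp hx
      obtain ⟨hpok, _⟩ := hanc p hp
      have := okT_inRange inputs p.1 p.2 hpok
      omega
    simp only [List.length_map] at this
    simp only [depthF]
    omega
  | .cons t f, i, anc, hok, hanc, hnd => by
    obtain ⟨ht, hf⟩ := hok
    have hni : i ∉ anc.map Prod.snd := by
      intro hmem
      obtain ⟨p, hp, hpi⟩ := List.mem_map.mp hmem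
      obtain ⟨hpok, hplt⟩ := hanc p hp
      have he : t = p.1 := okT_unique inputs t p.1 i ht (hpi ▸ hpok)
      have hle : nodesT t ≤ nodesF (PForest.cons t f) := by simp [nodesF]
      rw [← he] at hplt
      omega
    have hT := depth_bound_T inputs t i anc ht
      (fun p hp => ⟨(hanc p hp).1,
        lt_of_le_of_lt (by simp [nodesF]) (hanc p hp).2⟩) hnd hni
    have hF := depth_bound_F inputs f (endT i t) anc hf
      (fun p hp => ⟨(hanc p hp).1,
        lt_of_le_of_lt (by have := one_le_nodesT t; simp only [nodesF]; omega) (hanc p hp).2⟩) hnd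
    simp only [depthF]
    omega
end

-- width/nodes bound: every width is ≤ pvMaxAbs, so nodes ≤ (pvMaxAbs+1)^depth
mutual
theorem nodes_le_pow_T (inputs : List Int) : ∀ (t : PTree) (i : Int), okT inputs i t →
    nodesT t ≤ (pvMaxAbs inputs + 1) ^ depthT t
  | .node c m md f, i, hok => by
    obtain ⟨h1, h2, h3, h4, _⟩ := hok
    have hw : lenF f ≤ pvMaxAbs inputs := by
      have hc := natAbs_le_pvMaxAbs inputs c (PySem.List.mem_of_pyGet?_eq_some inputs h1)
      omega
    have hF := nodes_le_pow_F inputs f (i+2) h4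
    have hx : 1 ≤ (pvMaxAbs inputs + 1) ^ depthF f := Nat.one_le_pow _ _ (by omega)
    simp only [nodesT, depthT, pow_succ]
    calc nodesF f + 1 ≤ lenF f * (pvMaxAbs inputs + 1) ^ depthF f + 1 := by omega
      _ ≤ pvMaxAbs inputs * (pvMaxAbs inputs + 1) ^ depthF f + (pvMaxAbs inputs + 1) ^ depthF f := by
          have := Nat.mul_le_mul_right ((pvMaxAbs inputs + 1) ^ depthF f) hw
          omega
      _ = (pvMaxAbs inputs + 1) ^ depthF f * (pvMaxAbs inputs + 1) := by ring
theorem nodes_le_pow_F (inputs : List Int) : ∀ (f : PForest) (i : Int), okF inputs i f →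
    nodesF f ≤ lenF f * (pvMaxAbs inputs + 1) ^ depthF f
  | .nil, _, _ => by simp [nodesF, lenF]
  | .cons t f, i, hok => by
    obtain ⟨ht, hf⟩ := hok
    have hT := nodes_le_pow_T inputs t i ht
    have hF := nodes_le_pow_F inputs f (endT i t) hf
    have hmono : ∀ d, d ≤ max (depthT t) (depthF f) →
        (pvMaxAbs inputs + 1) ^ d ≤ (pvMaxAbs inputs + 1) ^ max (depthT t) (depthF f) :=
      fun d hd => Nat.pow_le_pow_right (by omega) hd
    have h1 := hmono (depthT t) (le_max_left _ _)
    have h2 := Nat.mul_le_mul_left (lenF f) (hmono (depthF f) (le_max_right _ _))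
    simp only [nodesF, lenF, depthF, Nat.succ_mul]
    omega
end

theorem nodesT_le_pvFuel (inputs : List Int) (t : PTree) (i : Int) (h : okT inputs i t) :
    nodesT t ≤ pvFuel inputs := by
  have hd : depthT t ≤ 2 * inputs.length := by
    have := depth_bound_T inputs t i [] h (by intro p hp; cases hp) (by simp) (by simp)
    simpa using this
  calc nodesT t ≤ (pvMaxAbs inputs + 1) ^ depthT t := nodes_le_pow_T inputs t i h
    _ ≤ (pvMaxAbs inputs + 1) ^ (2 * inputs.length) := Nat.pow_le_pow_right (by omega) hd
    _ = pvFuel inputs := rfl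

-- Pre_solve: the suffix of inputs at index parses as one header-tree node — exactly the inputs
-- on which the Python A returns (outside it A raises: IndexError, or RecursionError on an
-- unbounded position cycle).
def Pre_solve (inputs : List Int) (index : Int) : Prop :=
  ∃ t : PTree, okT inputs index t

instance (inputs : List Int) (index : Int) : Decidable (Pre_solve inputs index) :=
  decidable_of_iff
    ((chkG inputs (pvFuel inputs + 1) 1 (pvFuel inputs) index).isSome)
    (by
      constructor
      · intro hs
        rcases Option.isSome_iff_exists.1 hs with ⟨jb, hjb⟩
        obtain ⟨j, b'⟩ := jb
        rcases chkG_sound inputs _ _ _ _ _ _ hjb with ⟨f, hf1, hf2, _, _⟩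
        cases f with
        | nil => simp [lenF] at hf1
        | cons t f' =>
          exact ⟨t, hf2.1⟩
      · rintro ⟨t, hok⟩
        have hcap := nodesT_le_pvFuel inputs t index hok
        have h := chkG_complete inputs (pvFuel inputs + 1)
          (.cons t .nil) (pvFuel inputs) index
          ⟨hok, trivial⟩ (by simp [nodesF]; omega) (by simp [nodesF]; omega)
        rw [show lenF (.cons t .nil) = 1 from rfl] at h
        rw [h]
        simp)

def pvWitness_solve : List Int × Int := ([0, 1, 99], 0)

def Spec_solve (inputs : List Int) (index : Int) (out : Int × Int) : Prop := out = solve_alt inputs index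
instance (inputs : List Int) (index : Int) (out : Int × Int) : Decidable (Spec_solve inputs index out) := by unfold Spec_solve; infer_instance

-- ===== CLAIM (what is proved, stated in full; the proofs are below) =====
def Claim_equal_solve : Prop := ∀ (inputs : List Int) (index : Int), Dom_solve inputs index → Pre_solve inputs index → Spec_solve inputs index (solve inputs index)

-- ===== LEMMAS AND PROOFS =====

-- the denotation: value of a node / list of the children's values
mutual
def valT : PTree → Int
  | .node c _ md f => nodeValue c md (valsF f)
def valsF : PForest → List Int
  | .nil => []
  | .cons t f => valT t :: valsF f
end

theorem valsF_length : ∀ (f : PForest), (valsF f).length = lenF f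
  | .nil => rfl
  | .cons t f => by simp [valsF, lenF, valsF_length f]

theorem pyRange_children (c : Int) (L : Nat) (h : c.toNat = L) :
    PySem.List.pyRange 1 (c+1) 1 = PySem.List.pyRange 1 (1 + (L : Int)) 1 := by
  by_cases hc : 0 ≤ c
  · congr 1; omega
  · rw [PySem.List.pyRange_one_eq_nil (by omega), PySem.List.pyRange_one_eq_nil (by omega)]

-- lookup in the dict built by inserting consecutive keys a, a+1, … with values vals
theorem getD_zipfold (vals : List Int) :
    ∀ (a : Int) (d : PySem.Dict Int Int) (x : Int),
    (((PySem.List.pyRange a (a + vals.length) 1).zip vals).foldl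
        (fun d p => d.insert p.1 p.2) d).getD x 0 =
      if a ≤ x ∧ x < a + vals.length then (PySem.List.pyGet? vals (x - a)).getD 0
      else d.getD x 0 := by
  induction vals with
  | nil =>
    intro a d x
    rw [show ((([] : List Int)).length : Int) = 0 by simp, PySem.List.pyRange_one_eq_nil (by omega)]
    simp only [List.zip_nil_right, List.foldl_nil, add_zero]
    rw [if_neg (by omega)]
  | cons v vals ih =>
    intro a d x
    have hlen : (((v :: vals)).length : Int) = (vals.length : Int) + 1 := by
      simp only [List.length_cons]; push_cast; ring
    rw [hlen, show a + ((vals.length : Int) + 1) = (a + 1) + (vals.length : Int) by ring,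
        PySem.List.pyRange_one_cons (by omega)]
    simp only [List.zip_cons_cons, List.foldl_cons]
    rw [ih (a + 1) (d.insert a v) x]
    rw [PySem.Dict.getD_insert]
    by_cases hx : x = a
    · subst hx
      rw [if_neg (by omega), if_pos rfl, if_pos (by omega)]
      simp
    · rw [if_neg hx]
      by_cases hmid : a + 1 ≤ x ∧ x < a + 1 + (vals.length : Int)
      · rw [if_pos hmid, if_pos (by omega)]
        rw [PySem.List.pyGet?_of_nonneg (h := by omega), PySem.List.pyGet?_of_nonneg (h := by omega)]
        have ht : (x - a).toNat = (x - (a + 1)).toNat + 1 := by omega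
        rw [ht, List.getElem?_cons_succ]
      · rw [if_neg hmid, if_neg (by omega)]

-- ===== A-side: aGo computes the denotation =====
mutual
theorem A_T (inputs : List Int) (t : PTree) :
    ∀ (i : Int) (fuel : Nat), nodesT t ≤ fuel → okT inputs i t →
    aGo fuel inputs i = some (valT t, endT i t) := by
  intro i fuel hfuel hok
  cases t with
  | node c m md f =>
    obtain ⟨hg1, hg2, hcnt, hokf, hread⟩ := hok
    obtain ⟨F, rfl⟩ : ∃ F, fuel = F + 1 := ⟨fuel - 1, by simp only [nodesT] at hfuel; omega⟩
    have hL : (PySem.List.pyRange 1 (c + 1) 1).length = lenF f := by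
      rw [PySem.List.length_pyRange_one]; omega
    have hrec := A_F inputs f (i+2) F PySem.Dict.empty _
      (by simp only [nodesT] at hfuel; omega) hokf hL
    simp only [aGo, hg1, hg2, hrec, hread]
    have hval : (if c = 0 then md.sum
        else (md.map (fun child =>
          (((PySem.List.pyRange 1 (c + 1) 1).zip (valsF f)).foldl
            (fun d p => d.insert p.1 p.2) PySem.Dict.empty).getD child 0)).sum)
        = valT (.node c m md f) := by
      simp only [valT, nodeValue]
      by_cases hc : c = 0
      · rw [if_pos hc, if_pos hc]
      · rw [if_neg hc, if_neg hc]
        congr 1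
        apply List.map_congr_left
        intro x _
        rw [pyRange_children c (valsF f).length (by rw [valsF_length]; omega),
            getD_zipfold, PySem.Dict.getD_empty]
        by_cases hx : 1 ≤ x ∧ x < 1 + ((valsF f).length : Int)
        · rw [if_pos hx, if_pos (by omega)]
        · rw [if_neg hx, if_neg (by omega)]
    rw [hval]
    rfl

theorem A_F (inputs : List Int) (f : PForest) :
    ∀ (i : Int) (fuel : Nat) (d : PySem.Dict Int Int) (L : List Int),
    nodesF f ≤ fuel → okF inputs i f → L.length = lenF f →
    aChildren fuel inputs L d i =
      some ((L.zip (valsF f)).foldl (fun d p => d.insert p.1 p.2) d, endF i f) := by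
  intro i fuel d L hfuel hok hL
  cases f with
  | nil =>
    have hLnil : L = [] := List.length_eq_zero_iff.1 (by simpa [lenF] using hL)
    subst hLnil
    simp [aChildren, valsF, endF]
  | cons t f' =>
    cases L with
    | nil => simp [lenF] at hL
    | cons k L' =>
      obtain ⟨hokt, hokf'⟩ := hok
      have hft : nodesT t ≤ fuel := by simp only [nodesF] at hfuel; omega
      rw [aChildren, A_T inputs t i fuel hft hokt]
      dsimp only
      rw [A_F inputs f' (endT i t) fuel (d.insert k (valT t)) L'
        (by simp only [nodesF] at hfuel; omega) hokf' (by simpa [lenF] using hL)]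
      simp [valsF, endF]
end

-- ===== B-side: the stack machine computes the denotation =====

-- one round of the outer loop body after bClose (how bLoop consumes a bClose result)
def bRun (fuel : Nat) (inputs : List Int) (i : Int) (stack : List (Int × Int × List Int)) : Option (Int × Int) :=
  match bClose inputs i stack with
  | none => none
  | some (.inl r) => some r
  | some (.inr (i', st')) => bLoop fuel inputs i' st'

-- state after a whole subtree has been processed and its value v delivered to the stack
def bAfter (fuel : Nat) (inputs : List Int) (i : Int) (v : Int) : List (Int × Int × List Int) → Option (Int × Int)
  | [] => some (v, i)
  | (c, m, vals) :: st => bRun fuel inputs i ((c, m, vals ++ [v]) :: st)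

theorem B_close (inputs md : List Int) (i c m : Int) (vals : List Int)
    (st : List (Int × Int × List Int)) (fuel : Nat)
    (hc : c ≤ (vals.length : Int)) (hread : readN inputs i m.toNat = some md) :
    bRun fuel inputs i ((c, m, vals) :: st) = bAfter fuel inputs (i + m) (nodeValue c md vals) st := by
  cases st with
  | nil =>
    unfold bRun
    rw [bClose, if_pos hc, hread]
    rfl
  | cons fr st2 =>
    obtain ⟨c2, m2, vals2⟩ := fr
    unfold bRun bAfter
    rw [bClose, if_pos hc, hread]
    rfl

mutual
theorem B_T (inputs : List Int) (t : PTree) :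
    ∀ (i : Int) (st : List (Int × Int × List Int)) (fuel : Nat),
    nodesT t ≤ fuel → okT inputs i t →
    bLoop fuel inputs i st = bAfter (fuel - nodesT t) inputs (endT i t) (valT t) st := by
  intro i st fuel hfuel hok
  cases t with
  | node c m md f =>
    obtain ⟨hg1, hg2, hcnt, hokf, hread⟩ := hok
    obtain ⟨F, rfl⟩ : ∃ F, fuel = F + 1 := ⟨fuel - 1, by simp only [nodesT] at hfuel; omega⟩
    simp only [bLoop, hg1, hg2]
    show bRun F inputs (i+2) ((c, m, []) :: st) = _
    by_cases hf : lenF f = 0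
    case pos =>
      have hfnil : f = .nil := by
        cases f with
        | nil => rfl
        | cons t' f'' => simp [lenF] at hf
      subst hfnil
      simp only [endF] at hread
      rw [B_close inputs md (i+2) c m [] st F (by simp only [lenF] at hcnt; simp; omega) hread]
      simp only [valT, valsF, nodesT, nodesF, endT, endF, Nat.add_sub_cancel]
    case neg =>
      have hcpos : c = (lenF f : Int) := by omega
      have hgt : ¬ (c ≤ (([] : List Int).length : Int)) := by simp; omega
      have hclr : bClose inputs (i+2) ((c, m, []) :: st)
          = some (.inr (i+2, (c, m, []) :: st)) := by
        rw [bClose, if_neg hgt]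
      unfold bRun
      rw [hclr]
      dsimp only
      rw [B_F inputs f (i+2) c m [] st F
        (by simp only [nodesT] at hfuel; omega) (by omega) (by simp; omega) hokf]
      rw [List.nil_append]
      rw [B_close inputs md _ c m (valsF f) st _ (by rw [valsF_length]; omega) hread]
      simp only [valT, nodesT, endT]
      congr 1
      omega

theorem B_F (inputs : List Int) (f : PForest) :
    ∀ (i c m : Int) (vals : List Int) (st : List (Int × Int × List Int)) (fuel : Nat),
    nodesF f ≤ fuel → 1 ≤ lenF f → c = (vals.length : Int) + (lenF f : Int) →
    okF inputs i f →
    bLoop fuel inputs i ((c, m, vals) :: st) =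
      bRun (fuel - nodesF f) inputs (endF i f) ((c, m, vals ++ valsF f) :: st) := by
  intro i c m vals st fuel hfuel hlen hc hok
  cases f with
  | nil => simp [lenF] at hlen
  | cons t f' =>
    obtain ⟨hokt, hokf'⟩ := hok
    have hft : nodesT t ≤ fuel := by simp only [nodesF] at hfuel; omega
    rw [B_T inputs t i ((c, m, vals) :: st) fuel hft hokt]
    simp only [bAfter]
    cases f' with
    | nil =>
      simp only [nodesF, valsF, endF, Nat.add_zero]
    | cons t2 f'' =>
      have hlf : 1 ≤ lenF (PForest.cons t2 f'') := by simp [lenF]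
      have hgt : ¬ (c ≤ (((vals ++ [valT t]).length : Nat) : Int)) := by
        simp only [List.length_append, List.length_singleton, lenF] at hc ⊢
        push_cast at hc ⊢
        omega
      have hclr : bClose inputs (endT i t) ((c, m, vals ++ [valT t]) :: st)
          = some (.inr (endT i t, (c, m, vals ++ [valT t]) :: st)) := by
        rw [bClose, if_neg hgt]
      unfold bRun
      rw [hclr]
      dsimp only
      rw [B_F inputs (PForest.cons t2 f'') (endT i t) c m (vals ++ [valT t]) st (fuel - nodesT t)
        (by simp only [nodesF] at hfuel ⊢; omega) hlf
        (by simp only [List.length_append, List.length_singleton, lenF] at hc ⊢; push_cast at hc ⊢; omega)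
        hokf']
      unfold bRun
      have e1 : fuel - nodesT t - nodesF (PForest.cons t2 f'') = fuel - nodesF (PForest.cons t (PForest.cons t2 f'')) := by
        simp only [nodesF]; omega
      have e3 : (vals ++ [valT t]) ++ valsF (PForest.cons t2 f'')
          = vals ++ valsF (PForest.cons t (PForest.cons t2 f'')) := by
        simp only [valsF, List.append_assoc, List.singleton_append]
      rw [e1, e3]
      rfl
end

-- ===== VERDICT (by name: the statement is the Claim_ definition above) =====
theorem solve_spec : Claim_equal_solve := by
  intro inputs index _hDom hPre
  obtain ⟨t, hok⟩ := hPre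
  have hn : nodesT t ≤ pvFuel inputs := nodesT_le_pvFuel inputs t index hok
  unfold Spec_solve solve solve_alt
  rw [A_T inputs t index _ hn hok, B_T inputs t index [] _ hn hok]
  rfl
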